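-- pv_equiv track=rewrite | github.com/fa-python-network/7_Symmetric_ciphers | Block.py | block_chain_decipher
-- ===== SOURCE A (Python) =====
-- def block_chain_decipher(k, c, iv, end=None):
--     lb, rb = 0, 65536
--
--     if end is None:
--         end = len(c)
--
--     start = end - len(k)
--     res = ''
--     for ind, s in enumerate(c[start:end]):
--         cur_code = ord(s) ^ ord(iv[ind] if start == 0 else c[start - len(k) + ind]) ^ ord(k[ind])
--         assert cur_code <= rb, f'Can not decipher symbol "{s}"'
--
--         res += chr(cur_code)
--
--     if end == len(c):
--         res = res.strip()  # убираем возможные дополнительные пробелы в конце последнего блока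
--
--     if start != 0:
--         return block_chain_decipher(k, c, iv, end=start) + res
--
--     return res
-- ===== SOURCE B (Python) =====
-- def block_chain_decipher(k, c, iv, end=None):
--     if end is None:
--         end = len(c)
--     n = len(k)
--     if n == 0:
--         if end != 0:
--             raise ValueError('cannot decipher with an empty key')
--         return ''
--     if end <= 0 or end % n != 0:
--         raise ValueError('end must be a positive multiple of the key length')
--     parts = []
--     start = 0
--     while start < end:
--         block = []
--         for ind, s in enumerate(c[start:start + n]):
--             prev = iv[ind] if start == 0 else c[start - n + ind]
--             cur_code = ord(s) ^ ord(prev) ^ ord(k[ind])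
--             assert cur_code <= 65536, f'Can not decipher symbol "{s}"'
--             block.append(chr(cur_code))
--         blk = ''.join(block)
--         if start + n == len(c):
--             blk = blk.strip()
--         parts.append(blk)
--         start += n
--     return ''.join(parts)
-- ===== Notes on version B (the rewrite author's own statement) =====
-- stated objective: faster
-- what changed: Replaces A's end-to-front recursion with quadratic string concatenation by a single front-to-back loop over block offsets that collects the deciphered blocks in a list joined once at the end.
import Mathlib
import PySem

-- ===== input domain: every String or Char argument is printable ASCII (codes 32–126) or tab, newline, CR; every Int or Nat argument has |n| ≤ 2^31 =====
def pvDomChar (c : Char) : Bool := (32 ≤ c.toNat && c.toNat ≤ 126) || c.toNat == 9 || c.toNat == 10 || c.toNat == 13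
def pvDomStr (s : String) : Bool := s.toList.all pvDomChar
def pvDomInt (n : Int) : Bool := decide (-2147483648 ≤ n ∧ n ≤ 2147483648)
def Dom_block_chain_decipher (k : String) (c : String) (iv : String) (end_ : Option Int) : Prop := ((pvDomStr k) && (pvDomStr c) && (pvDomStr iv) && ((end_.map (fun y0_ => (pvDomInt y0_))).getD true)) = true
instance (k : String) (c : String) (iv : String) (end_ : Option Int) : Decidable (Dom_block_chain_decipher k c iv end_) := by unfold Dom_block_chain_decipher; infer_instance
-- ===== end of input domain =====

-- B replaces A's end-to-front recursion (with O(n^2) string concatenation) by a single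
-- front-to-back loop over block offsets collecting the pieces in a list that is joined once.
-- (A's `assert cur_code <= 65536` can never fire on ASCII input, so neither port models it.)

-- ===== PORT A =====
-- fuel-bounded transliteration of A's recursion; fuel only guards totality (A diverges
-- outside Pre_); the wrapper passes fuel e.toNat + 1, enough whenever A's chain reaches 0
def pvRecA (k c iv : List Char) (e : Int) (fuel : Nat) : List Char :=
  match fuel with
  | 0 => []
  | Nat.succ fuel =>
    let start : Int := e - (k.length : Int)
    let res : List Char :=
      (PySem.List.enumerate (PySem.List.slice c (some start) (some e)) 0).foldl
        (fun res p =>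
          let cur : Int :=
            PySem.Int.bxor (PySem.Int.bxor ((p.2.toNat : Int))
              (((if start = 0 then PySem.List.pyGetD iv p.1 ' '
                 else PySem.List.pyGetD c (start - (k.length : Int) + p.1) ' ').toNat : Int)))
              (((PySem.List.pyGetD k p.1 ' ').toNat : Int))
          res ++ [Char.ofNat cur.toNat]) []
    let res := if e = (c.length : Int) then PySem.Chars.strip res else res
    if start ≠ 0 then pvRecA k c iv start fuel ++ res else res

def block_chain_decipher (k : String) (c : String) (iv : String) (end_ : Option Int) : String :=
  let e : Int := match end_ with | none => (c.toList.length : Int) | some x => x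
  String.ofList (pvRecA k.toList c.toList iv.toList e (e.toNat + 1))

-- ===== PORT B =====
-- one block of B: decipher c[start:start+len k], stripping the block that ends at len c
def pvBlockB (k c iv : List Char) (start : Int) : List Char :=
  let n : Int := (k.length : Int)
  let block : List Char :=
    (PySem.List.enumerate (PySem.List.slice c (some start) (some (start + n))) 0).foldl
      (fun block p =>
        let prev : Char :=
          if start = 0 then PySem.List.pyGetD iv p.1 ' '
          else PySem.List.pyGetD c (start - n + p.1) ' '
        let cur : Int :=
          PySem.Int.bxor (PySem.Int.bxor ((p.2.toNat : Int)) ((prev.toNat : Int)))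
            (((PySem.List.pyGetD k p.1 ' ').toNat : Int))
        block ++ [Char.ofNat cur.toNat]) []
  if start + n = (c.length : Int) then PySem.Chars.strip block else block

-- B's while-loop; `parts.append` becomes a cons-accumulator reversed on exit;
-- fuel only guards totality (B's Python raises ValueError outside Pre_)
def pvLoopB (k c iv : List Char) (e : Int) (start : Int) (parts : List (List Char)) (fuel : Nat) : List (List Char) :=
  match fuel with
  | 0 => parts.reverse
  | Nat.succ fuel =>
    if start < e then
      pvLoopB k c iv e (start + (k.length : Int)) (pvBlockB k c iv start :: parts) fuel
    else parts.reverse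

def block_chain_decipher_alt (k : String) (c : String) (iv : String) (end_ : Option Int) : String :=
  let e : Int := match end_ with | none => (c.toList.length : Int) | some x => x
  let n : Int := (k.toList.length : Int)
  if n = 0 then
    -- B raises ValueError when e ≠ 0 (outside Pre_; the port returns "" there), else returns ''
    String.ofList []
  else if e ≤ 0 ∨ PySem.Int.mod e n ≠ 0 then
    -- B raises ValueError here: outside Pre_; the port returns "" there
    String.ofList []
  else
    String.ofList (PySem.Chars.join [] (pvLoopB k.toList c.toList iv.toList e 0 [] (e.toNat + 1)))

-- ===== PRECONDITION & SPEC =====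
-- Pre_ is exactly the set of inputs where the Python A returns: elsewhere A either
-- recurses forever / hits the recursion limit (end not a positive multiple of len(k),
-- or len(k)=0 with end ≠ 0) or raises IndexError on iv (iv shorter than the first block).
def Pre_block_chain_decipher (k : String) (c : String) (iv : String) (end_ : Option Int) : Prop :=
  let e : Int := match end_ with | none => (c.toList.length : Int) | some x => x
  (k.toList.length = 0 ∧ e = 0) ∨
  (0 < k.toList.length ∧ 0 < e ∧ PySem.Int.mod e (k.toList.length : Int) = 0 ∧
    min k.toList.length c.toList.length ≤ iv.toList.length)
instance (k : String) (c : String) (iv : String) (end_ : Option Int) : Decidable (Pre_block_chain_decipher k c iv end_) := by unfold Pre_block_chain_decipher; infer_instance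

def pvWitness_block_chain_decipher : String × String × String × Option Int := ("k", "ab", "x", none)

def Spec_block_chain_decipher (k : String) (c : String) (iv : String) (end_ : Option Int) (out : String) : Prop := out = block_chain_decipher_alt k c iv end_
instance (k : String) (c : String) (iv : String) (end_ : Option Int) (out : String) : Decidable (Spec_block_chain_decipher k c iv end_ out) := by unfold Spec_block_chain_decipher; infer_instance

-- ===== CLAIM (what is proved, stated in full; the proofs are below) =====
def Claim_equal_block_chain_decipher : Prop := ∀ (k : String) (c : String) (iv : String) (end_ : Option Int), Dom_block_chain_decipher k c iv end_ → Pre_block_chain_decipher k c iv end_ → Spec_block_chain_decipher k c iv end_ (block_chain_decipher k c iv end_)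

-- ===== LEMMAS AND PROOFS =====

-- ''.join(parts) is concatenation
lemma pvJoin_nil_eq_flatten (parts : List (List Char)) :
    PySem.Chars.join [] parts = parts.flatten := by
  induction parts with
  | nil => rfl
  | cons p ps ih =>
    cases ps with
    | nil => simp [PySem.Chars.join, List.intercalate, List.intersperse]
    | cons q qs =>
      rw [PySem.Chars.join_cons_cons, ih]
      simp

-- one unfolding of A's recursion is B's block for start = e - len k
lemma pvRecA_succ (k c iv : List Char) (e : Int) (fuel : Nat) :
    pvRecA k c iv e (fuel + 1) =
      if e - (k.length : Int) ≠ 0 then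
        pvRecA k c iv (e - (k.length : Int)) fuel ++ pvBlockB k c iv (e - (k.length : Int))
      else pvBlockB k c iv (e - (k.length : Int)) := by
  have h : e - (k.length : Int) + (k.length : Int) = e := by ring
  simp only [pvRecA, pvBlockB, h]

-- A's whole chain at e = m * n is the concatenation of B's blocks, front to back
lemma pvRecA_chain (k c iv : List Char) (m : Nat) (hm : 1 ≤ m) (hn : 0 < k.length) :
    ∀ fuel : Nat, m ≤ fuel →
      pvRecA k c iv ((m : Int) * (k.length : Int)) fuel =
        ((List.range m).map (fun i : Nat => pvBlockB k c iv ((i : Int) * (k.length : Int)))).flatten := by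
  induction m, hm using Nat.le_induction with
  | base =>
    intro fuel hf
    match fuel, hf with
    | Nat.succ f, _ =>
      rw [pvRecA_succ]
      have h0 : ((1 : Nat) : Int) * (k.length : Int) - (k.length : Int) = 0 := by ring
      simp
  | succ m hm ih =>
    intro fuel hf
    match fuel, hf with
    | Nat.succ f, hf =>
      rw [pvRecA_succ]
      have h1 : ((m + 1 : Nat) : Int) * (k.length : Int) - (k.length : Int)
          = ((m : Nat) : Int) * (k.length : Int) := by push_cast; ring
      have h2 : ((m : Nat) : Int) * (k.length : Int) ≠ 0 := by
        have : (0 : Int) < (m : Int) * (k.length : Int) := by positivity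
        omega
      rw [h1, if_pos h2, ih f (by omega)]
      simp [List.range_succ]

-- B's loop from start = j * n with e = (j + t) * n collects blocks j, …, j+t-1
lemma pvLoopB_chain (k c iv : List Char) (hn : 0 < k.length) :
    ∀ (t j : Nat) (parts : List (List Char)) (fuel : Nat), t ≤ fuel →
      pvLoopB k c iv (((j + t : Nat) : Int) * (k.length : Int)) ((j : Int) * (k.length : Int)) parts fuel =
        parts.reverse ++ (List.range t).map (fun i : Nat => pvBlockB k c iv (((j + i : Nat) : Int) * (k.length : Int))) := by
  intro t
  induction t with
  | zero =>
    intro j parts fuel hf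
    cases fuel with
    | zero => simp [pvLoopB]
    | succ f => simp [pvLoopB]
  | succ t ih =>
    intro j parts fuel hf
    match fuel, hf with
    | Nat.succ f, hf =>
      rw [pvLoopB]
      have hlt : ((j : Nat) : Int) * (k.length : Int) < ((j + (t + 1) : Nat) : Int) * (k.length : Int) := by
        push_cast
        have : (0 : Int) < (k.length : Int) := by exact_mod_cast hn
        nlinarith
      rw [if_pos hlt]
      have harg : ((j : Nat) : Int) * (k.length : Int) + (k.length : Int)
          = (((j + 1 : Nat)) : Int) * (k.length : Int) := by push_cast; ring
      have he : ((j + (t + 1) : Nat) : Int) = (((j + 1) + t : Nat) : Int) := by push_cast; ring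
      rw [harg, he, ih (j + 1) _ f (by omega)]
      have : ∀ i : Nat, (j + 1 + i : Nat) = (j + (i + 1) : Nat) := by omega
      simp [List.range_succ_eq_map, Function.comp, this, List.append_assoc]

-- len(k) = 0 and end = 0: A's port returns the empty string
lemma pvA_zero (c iv : List Char) :
    pvRecA [] c iv 0 1 = [] := by
  have hs : PySem.List.slice c (some (0 : Int)) (some (0 : Int)) = [] := by
    rw [PySem.List.slice_toNat c (le_refl 0) (le_refl 0)]; simp
  have hstrip : PySem.Chars.strip ([] : List Char) = [] := by decide
  simp [pvRecA, hs, hstrip]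

-- the two ports agree on the list level when len(k) > 0 and end is a positive multiple of it
lemma pvMain_list (k c iv : List Char) (e : Int)
    (hn : 0 < k.length) (he : 0 < e) (hmod : PySem.Int.mod e (k.length : Int) = 0) :
    pvRecA k c iv e (e.toNat + 1) = PySem.Chars.join [] (pvLoopB k c iv e 0 [] (e.toNat + 1)) := by
  rw [pvJoin_nil_eq_flatten]
  have hdvd : ((k.length : Int)) ∣ e := (PySem.Int.mod_eq_zero_iff_dvd e _).mp hmod
  obtain ⟨q, hq⟩ := hdvd
  have hq0 : 0 < q := by
    by_contra h
    push Not at h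
    have hkpos : (0 : Int) < (k.length : Int) := by exact_mod_cast hn
    nlinarith [hq]
  set m : Nat := q.toNat with hm
  have hqm : q = (m : Int) := by omega
  have hem : e = (m : Int) * (k.length : Int) := by rw [hq, hqm]; ring
  have hm1 : 1 ≤ m := by omega
  have hfuel : m ≤ e.toNat + 1 := by
    have h1 : (m : Int) * 1 ≤ (m : Int) * (k.length : Int) := by
      apply mul_le_mul_of_nonneg_left _ (by omega)
      exact_mod_cast hn
    omega
  rw [hem, pvRecA_chain k c iv m hm1 hn _ (by rw [← hem]; exact hfuel)]
  have h0 : (0 : Int) = ((0 : Nat) : Int) * (k.length : Int) := by simp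
  have he' : (m : Int) * (k.length : Int) = (((0 + m : Nat)) : Int) * (k.length : Int) := by
    simp
  rw [h0, he', pvLoopB_chain k c iv hn m 0 [] _ (by rw [← he', ← hem]; exact hfuel)]
  simp

-- assemble the two Pre_ cases for either form of end_
lemma pvSpec_aux (k c iv : String) (e : Int)
    (hpre : (k.toList.length = 0 ∧ e = 0) ∨
      (0 < k.toList.length ∧ 0 < e ∧ PySem.Int.mod e (k.toList.length : Int) = 0 ∧
        min k.toList.length c.toList.length ≤ iv.toList.length)) :
    String.ofList (pvRecA k.toList c.toList iv.toList e (e.toNat + 1)) =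
      (if ((k.toList.length : Int)) = 0 then String.ofList []
       else if e ≤ 0 ∨ PySem.Int.mod e ((k.toList.length : Int)) ≠ 0 then String.ofList []
       else String.ofList (PySem.Chars.join [] (pvLoopB k.toList c.toList iv.toList e 0 [] (e.toNat + 1)))) := by
  rcases hpre with ⟨hk, he⟩ | ⟨hn, he, hmod, _⟩
  · subst he
    obtain hk' : k.toList = [] := List.length_eq_zero_iff.mp hk
    rw [if_pos (by simp [hk']), hk']
    exact congrArg String.ofList (pvA_zero _ _)
  · rw [if_neg (by exact_mod_cast Nat.pos_iff_ne_zero.mp hn), if_neg (by push Not; exact ⟨by omega, hmod⟩)]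
    exact congrArg String.ofList (pvMain_list _ _ _ _ hn he hmod)

-- ===== VERDICT (by name: the statement is the Claim_ definition above) =====
theorem block_chain_decipher_spec : Claim_equal_block_chain_decipher := by
  intro k c iv end_ _ hpre
  unfold Spec_block_chain_decipher block_chain_decipher block_chain_decipher_alt
  cases end_ with
  | none => exact pvSpec_aux k c iv _ hpre
  | some x => exact pvSpec_aux k c iv _ hpre
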